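-- pv_equiv track=rewrite | github.com/paiml/depyler | examples/hard_edge_list_rotate.py | reverse_subarray
-- ===== SOURCE A (Python) =====
-- def reverse_subarray(arr: list[int], start: int, end: int) -> list[int]:
--     """Reverse elements from start to end (inclusive) in a copy."""
--     result: list[int] = []
--     i: int = 0
--     while i < len(arr):
--         result.append(arr[i])
--         i = i + 1
--     lo: int = start
--     hi: int = end
--     while lo < hi:
--         tmp: int = result[lo]
--         result[lo] = result[hi]
--         result[hi] = tmp
--         lo = lo + 1
--         hi = hi - 1
--     return result
-- ===== SOURCE B (Python) =====
-- def reverse_subarray(arr: list[int], start: int, end: int) -> list[int]: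
--     """Reverse elements from start to end (inclusive) in a copy."""
--     if start >= end:
--         return list(arr)
--     return arr[:start] + arr[start:end + 1][::-1] + arr[end + 1:]
-- ===== Notes on version B (the rewrite author's own statement) =====
-- stated objective: simpler
-- what changed: Replaces A's element-by-element copy loop plus in-place two-pointer swap loop with a single slice/concatenate expression (prefix + reversed inclusive middle + suffix), done by C-level list slicing instead of per-element Python bytecode.
-- outside the precondition, e.g. on reverse_subarray([1, 2, 3], -1, 2): A returns [2, 1, 3], B returns [1, 2, 3]; on reverse_subarray([1, 2, 3], 0, 5): A raises IndexError, B returns [3, 2, 1]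
import Mathlib
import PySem

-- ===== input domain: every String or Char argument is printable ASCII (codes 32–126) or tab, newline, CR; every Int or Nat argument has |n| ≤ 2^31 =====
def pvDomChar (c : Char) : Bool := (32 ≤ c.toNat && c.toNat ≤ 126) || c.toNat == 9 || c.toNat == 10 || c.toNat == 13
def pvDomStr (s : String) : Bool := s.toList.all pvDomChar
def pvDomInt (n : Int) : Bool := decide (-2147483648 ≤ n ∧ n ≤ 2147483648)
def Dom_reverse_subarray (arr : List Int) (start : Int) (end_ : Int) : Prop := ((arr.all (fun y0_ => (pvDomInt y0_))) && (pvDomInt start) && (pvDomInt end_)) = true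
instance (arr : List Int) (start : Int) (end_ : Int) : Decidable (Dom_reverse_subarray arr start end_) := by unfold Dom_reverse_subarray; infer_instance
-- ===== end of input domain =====

-- B replaces A's copy loop + in-place two-pointer swap loop by one slice/concatenate
-- expression (prefix ++ reversed inclusive middle ++ suffix); equally O(n), simpler.
-- A mutates only its local copy, so return-value equivalence is full equivalence.

-- ===== PORT A =====
-- while i < len(arr): result.append(arr[i]); i += 1   (i stays in range, so pyGetD is exact)
def pvCopyLoop (arr : List Int) (res : List Int) (i : Int) : List Int :=
  if _h : i < (arr.length : Int) then
    pvCopyLoop arr (res ++ [PySem.List.pyGetD arr i 0]) (i + 1)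
  else res
termination_by ((arr.length : Int) - i).toNat
decreasing_by omega

-- while lo < hi: tmp = result[lo]; result[lo] = result[hi]; result[hi] = tmp; lo += 1; hi -= 1
-- (under Pre_ every executed index is in range, so pyGetD/pySetD are exact there)
def pvSwapLoop (res : List Int) (lo : Int) (hi : Int) : List Int :=
  if _h : lo < hi then
    let tmp := PySem.List.pyGetD res lo 0
    let res1 := PySem.List.pySetD res lo (PySem.List.pyGetD res hi 0)
    let res2 := PySem.List.pySetD res1 hi tmp
    pvSwapLoop res2 (lo + 1) (hi - 1)
  else res
termination_by (hi - lo).toNat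
decreasing_by omega

def reverse_subarray (arr : List Int) (start : Int) (end_ : Int) : List Int :=
  pvSwapLoop (pvCopyLoop arr [] 0) start end_

-- ===== PORT B =====
-- list(arr) is arr; arr[x:y] is PySem.List.slice; [::-1] is List.reverse (PySem.List.slice?_none_none_neg_one)
def reverse_subarray_alt (arr : List Int) (start : Int) (end_ : Int) : List Int :=
  if start ≥ end_ then arr
  else PySem.List.slice arr none (some start) ++
       (PySem.List.slice arr (some start) (some (end_ + 1))).reverse ++
       PySem.List.slice arr (some (end_ + 1)) none

-- ===== PRECONDITION & SPEC =====
-- Pre_ excludes exactly the inputs on which the swap loop runs with a raw index outside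
-- [0, len): there A either raises IndexError (first index outside [-len, len)) or swaps
-- through Python's negative-index wraparound, an artefact of indexing the copy with the
-- raw start/end that no caller would specify; B reverses the clamped slice there.
def Pre_reverse_subarray (arr : List Int) (start : Int) (end_ : Int) : Prop :=
  start < end_ → (0 ≤ start ∧ end_ < (arr.length : Int))
instance (arr : List Int) (start : Int) (end_ : Int) : Decidable (Pre_reverse_subarray arr start end_) := by unfold Pre_reverse_subarray; infer_instance

def pvWitness_reverse_subarray : List Int × Int × Int := ([1, 2, 3], 0, 2)

def Spec_reverse_subarray (arr : List Int) (start : Int) (end_ : Int) (out : List Int) : Prop := out = reverse_subarray_alt arr start end_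
instance (arr : List Int) (start : Int) (end_ : Int) (out : List Int) : Decidable (Spec_reverse_subarray arr start end_ out) := by unfold Spec_reverse_subarray; infer_instance

-- ===== CLAIM (what is proved, stated in full; the proofs are below) =====
def Claim_equal_reverse_subarray : Prop := ∀ (arr : List Int) (start : Int) (end_ : Int), Dom_reverse_subarray arr start end_ → Pre_reverse_subarray arr start end_ → Spec_reverse_subarray arr start end_ (reverse_subarray arr start end_)

-- ===== LEMMAS AND PROOFS =====

lemma pvCopyLoop_eq (arr : List Int) (d : Nat) :
    ∀ (i : Nat) (res : List Int), arr.length - i ≤ d →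
      pvCopyLoop arr res (i : Int) = res ++ arr.drop i := by
  induction d with
  | zero =>
    intro i res h
    unfold pvCopyLoop
    rw [dif_neg (by omega)]
    rw [List.drop_eq_nil_of_le (by omega), List.append_nil]
  | succ d ih =>
    intro i res h
    unfold pvCopyLoop
    by_cases hlt : i < arr.length
    · rw [dif_pos (by exact_mod_cast hlt)]
      have hcast : (i : Int) + 1 = ((i + 1 : Nat) : Int) := by push_cast; ring
      rw [hcast, ih (i + 1) _ (by omega)]
      rw [PySem.List.pyGetD_natCast, List.getD_eq_getElem _ _ hlt,
        List.drop_eq_getElem_cons hlt]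
      simp
    · rw [dif_neg (by exact_mod_cast hlt)]
      rw [List.drop_eq_nil_of_le (by omega), List.append_nil]

lemma pvSwapLoop_length (res : List Int) (lo hi : Int) :
    (pvSwapLoop res lo hi).length = res.length := by
  unfold pvSwapLoop
  split
  · rw [pvSwapLoop_length]
    simp [PySem.List.length_pySetD]
  · rfl
termination_by (hi - lo).toNat
decreasing_by omega

lemma pvSwapLoop_get (d : Nat) :
    ∀ (res : List Int) (lo hi : Nat) (_hd : hi + 1 - lo ≤ d) (_hhi : hi < res.length)
      (i : Nat) (_hi2 : i < res.length),
        (pvSwapLoop res (lo : Int) (hi : Int))[i]? =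
          if _h : lo ≤ i ∧ i ≤ hi then some (res[lo + hi - i]'(by omega)) else res[i]? := by
  induction d with
  | zero =>
    intro res lo hi hd hhi i hi2
    have hnl : ¬ ((lo : Int) < (hi : Int)) := by exact_mod_cast (by omega : ¬ lo < hi)
    unfold pvSwapLoop
    rw [dif_neg hnl]
    split_ifs with hcase
    · rw [List.getElem?_eq_getElem hi2]
      have : lo + hi - i = i := by omega
      simp only [this]
    · rfl
  | succ d ih =>
    intro res lo hi hd hhi i hi2
    by_cases hlt : lo < hi
    · have hlt' : (lo : Int) < (hi : Int) := by exact_mod_cast hlt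
      have hlo : lo < res.length := by omega
      unfold pvSwapLoop
      rw [dif_pos hlt']
      simp only [PySem.List.pyGetD_natCast, PySem.List.pySetD_natCast]
      have hc1 : (lo : Int) + 1 = ((lo + 1 : Nat) : Int) := by push_cast; ring
      have hc2 : (hi : Int) - 1 = ((hi - 1 : Nat) : Int) := by
        have : 1 ≤ hi := by omega
        push_cast [this]; ring
      rw [hc1, hc2]
      have hlen2 : hi - 1 < ((res.set lo (res.getD hi 0)).set hi (res.getD lo 0)).length := by
        simp; omega
      have hilen2 : i < ((res.set lo (res.getD hi 0)).set hi (res.getD lo 0)).length := by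
        simp; omega
      rw [ih _ (lo + 1) (hi - 1) (by omega) hlen2 i hilen2]
      have hget : ∀ (j : Nat) (hj : j < ((res.set lo (res.getD hi 0)).set hi (res.getD lo 0)).length),
          ((res.set lo (res.getD hi 0)).set hi (res.getD lo 0))[j]'hj =
            if hi = j then res[lo]'hlo else if lo = j then res[hi]'hhi else res[j]'(by simp at hj; omega) := by
        intro j hj
        simp only [List.getElem_set, List.getD_eq_getElem _ _ hhi, List.getD_eq_getElem _ _ hlo]
      split_ifs with h1 h2
      · -- interior on both sides
        rw [hget]
        rw [if_neg (by omega), if_neg (by omega)]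
        have e1 : lo + 1 + (hi - 1) - i = lo + hi - i := by omega
        simp only [e1]
      · omega
      · -- boundary: i = lo or i = hi
        rw [List.getElem?_eq_getElem hilen2, hget]
        rcases (by omega : i = lo ∧ lo < hi ∨ i = hi) with h | h
        · rw [if_neg (by omega), if_pos (by omega : lo = i)]
          have e1 : lo + hi - i = hi := by omega
          simp only [e1]
        · rw [if_pos h.symm]
          have e1 : lo + hi - i = lo := by omega
          simp only [e1]
      · -- outside [lo, hi]
        rw [List.getElem?_eq_getElem hilen2, hget, if_neg (by omega), if_neg (by omega),
          List.getElem?_eq_getElem hi2]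
    · have hnl : ¬ ((lo : Int) < (hi : Int)) := by exact_mod_cast hlt
      unfold pvSwapLoop
      rw [dif_neg hnl]
      split_ifs with hcase
      · rw [List.getElem?_eq_getElem hi2]
        have e1 : lo + hi - i = i := by omega
        simp only [e1]
      · rfl

lemma concat_get (arr : List Int) (s e : Nat) (hse : s ≤ e) (he : e < arr.length)
    (i : Nat) (hi2 : i < arr.length) :
    (arr.take s ++ ((arr.drop s).take (e + 1 - s)).reverse ++ arr.drop (e + 1))[i]'(by
        simp; omega) =
      if _h : s ≤ i ∧ i ≤ e then arr[s + e - i]'(by omega) else arr[i] := by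
  have hts : (arr.take s).length = s := by simp; omega
  have hm : (((arr.drop s).take (e + 1 - s)).reverse).length = e + 1 - s := by simp; omega
  by_cases hA : i < s
  · rw [dif_neg (by omega)]
    rw [List.getElem_append_left (by rw [List.length_append, hts, hm]; omega),
      List.getElem_append_left (by rw [hts]; omega), List.getElem_take]
  · by_cases hB : i ≤ e
    · rw [dif_pos ⟨by omega, hB⟩]
      rw [List.getElem_append_left (by rw [List.length_append, hts, hm]; omega),
        List.getElem_append_right (by rw [hts]; omega),
        List.getElem_reverse, List.getElem_take, List.getElem_drop]
      congr 1
      simp only [List.length_take, List.length_drop, hts]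
      omega
    · rw [dif_neg (by omega)]
      rw [List.getElem_append_right (by rw [List.length_append, hts, hm]; omega),
        List.getElem_drop]
      congr 1
      rw [List.length_append, hts, hm]
      omega

-- ===== VERDICT (by name: the statement is the Claim_ definition above) =====
theorem reverse_subarray_spec : Claim_equal_reverse_subarray := by
  intro arr start end_ _hdom hpre
  unfold Spec_reverse_subarray reverse_subarray reverse_subarray_alt
  have hcopy : pvCopyLoop arr [] 0 = arr := by
    have := pvCopyLoop_eq arr arr.length 0 [] (by omega)
    simpa using this
  rw [hcopy]
  by_cases hc : start < end_
  · rw [if_neg (by omega)]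
    obtain ⟨h0, h1⟩ := hpre hc
    set s := start.toNat with hs
    set e := end_.toNat with he
    have hs' : start = (s : Int) := by omega
    have he' : end_ = (e : Int) := by omega
    have hse : s < e := by omega
    have helen : e < arr.length := by omega
    rw [hs', he']
    have hcast : ((e : Int) + 1) = ((e + 1 : Nat) : Int) := by push_cast; ring
    rw [hcast, PySem.List.slice_to_natCast, PySem.List.slice_natCast,
      PySem.List.slice_from_natCast]
    apply List.ext_getElem?
    intro i
    by_cases hi2 : i < arr.length
    · rw [pvSwapLoop_get (e + 1) arr s e (by omega) helen i hi2,
        List.getElem?_eq_getElem (l := arr.take s ++ ((arr.drop s).take (e + 1 - s)).reverse ++ arr.drop (e + 1)) (by simp; omega),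
        concat_get arr s e (by omega) helen i hi2]
      split_ifs
      · rfl
      · rw [List.getElem?_eq_getElem hi2]
    · rw [List.getElem?_eq_none (by rw [pvSwapLoop_length]; omega),
        List.getElem?_eq_none (by simp; omega)]
  · rw [if_pos (by omega)]
    unfold pvSwapLoop
    rw [dif_neg (by omega)]
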